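-- pv_equiv track=rewrite | github.com/Xexxar/storypyord | src/common/resolver.py | determine_time_windows
-- ===== SOURCE A (Python) =====
-- def determine_time_windows(functions):
--     windows = set({})
--
--     for function in functions:
--         if function.get("start") not in windows:
--             windows.add(function.get("start"))
--         if function.get("end") not in windows:
--             windows.add(function.get("end"))
--
--     windows = list(windows)
--     windows.sort()
--
--     out = []
--
--     for x in range(len(windows) - 1):
--         out.append([windows[x], windows[x + 1]])
--
--     return out
-- ===== SOURCE B (Python) =====
-- def determine_time_windows(functions):
--     # Selection-based: collect the distinct start/end values, then repeatedly
--     # extract the minimum of what remains, pairing each extracted value with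
--     # the next one -- no sort and no index arithmetic.
--     pending = set()
--     for function in functions:
--         pending.add(function.get("start"))
--         pending.add(function.get("end"))
--     out = []
--     if not pending:
--         return out
--     lo = min(pending)
--     pending.discard(lo)
--     while pending:
--         nxt = min(pending)
--         pending.discard(nxt)
--         out.append([lo, nxt])
--         lo = nxt
--     return out
-- ===== Notes on version B (the rewrite author's own statement) =====
-- stated objective: alternative
-- what changed: B replaces A's sort of the deduplicated list and index-based adjacent-pair loop by a selection loop that repeatedly extracts the minimum of the remaining values, emitting each pair as it goes; no sort call and no indexing remain.
import Mathlib
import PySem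

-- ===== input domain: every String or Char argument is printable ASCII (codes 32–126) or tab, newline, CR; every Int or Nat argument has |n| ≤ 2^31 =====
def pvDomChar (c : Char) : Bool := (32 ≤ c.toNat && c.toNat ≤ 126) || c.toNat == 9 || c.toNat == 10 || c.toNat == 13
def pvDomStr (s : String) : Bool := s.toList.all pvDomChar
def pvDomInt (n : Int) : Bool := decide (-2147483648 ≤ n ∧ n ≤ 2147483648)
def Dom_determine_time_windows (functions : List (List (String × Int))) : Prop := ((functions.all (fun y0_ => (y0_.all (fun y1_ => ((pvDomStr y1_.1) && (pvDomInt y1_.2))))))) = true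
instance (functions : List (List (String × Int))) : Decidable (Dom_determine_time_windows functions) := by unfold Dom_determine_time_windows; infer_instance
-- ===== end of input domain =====

-- B replaces A's sort-then-index-adjacent-pairs by a selection loop that repeatedly
-- extracts the minimum of the remaining distinct values (objective: alternative).

-- ===== PORT A =====
def determine_time_windows (functions : List (List (String × Int))) : List (List Int) :=
  let windows : PySem.Set (Option Int) :=
    functions.foldl (fun windows function =>
      let windows :=
        if !(PySem.Set.contains windows ((PySem.Dict.mk function).get? "start")) then
          PySem.Set.add windows ((PySem.Dict.mk function).get? "start")
        else windows
      if !(PySem.Set.contains windows ((PySem.Dict.mk function).get? "end")) then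
        PySem.Set.add windows ((PySem.Dict.mk function).get? "end")
      else windows) PySem.Set.empty
  -- windows = list(windows); windows.sort(): exact inside Pre_, where the set is homogeneous
  -- (all ints — key (·.getD 0) compares exactly as Python there — or the singleton {None})
  let windows := PySem.List.sorted windows (fun o => o.getD 0) false
  -- out.append([windows[x], windows[x+1]]): inside Pre_ the loop only runs when every element
  -- is an int (≥ 2 distinct values), so .getD 0 is exact
  (PySem.List.pyRange 0 ((windows.length : Int) - 1) 1).foldl
    (fun out x =>
      out ++ [[(PySem.List.pyGetD windows x none).getD 0,
               (PySem.List.pyGetD windows (x + 1) none).getD 0]]) []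

-- ===== PORT B =====
-- B's 'while pending: nxt = min(pending); pending.discard(nxt); out.append([lo, nxt]); lo = nxt'
-- loop, with fuel making the recursion total (each step discards the extracted minimum).
-- min(pending): key (·.getD 0) is exact inside Pre_, where the loop only runs on int values;
-- .getD 0 in the appended pair is exact there for the same reason.
def bLoop : Nat → PySem.Set (Option Int) → Option Int → List (List Int) → List (List Int)
  | 0, _, _, out => out
  | fuel + 1, pending, lo, out =>
    if pending.isEmpty then out
    else
      let nxt := (PySem.List.min? pending (fun o => o.getD 0)).getD none
      bLoop fuel (PySem.Set.discard pending nxt) nxt (out ++ [[lo.getD 0, nxt.getD 0]])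

def determine_time_windows_alt (functions : List (List (String × Int))) : List (List Int) :=
  let pending : PySem.Set (Option Int) :=
    functions.foldl (fun pending function =>
      PySem.Set.add (PySem.Set.add pending ((PySem.Dict.mk function).get? "start"))
        ((PySem.Dict.mk function).get? "end")) PySem.Set.empty
  let out : List (List Int) := []
  if pending.isEmpty then out
  else
    -- lo = min(pending): pending is nonempty here; distinct values, so the minimum is unique
    let lo := (PySem.List.min? pending (fun o => o.getD 0)).getD none
    bLoop pending.length (PySem.Set.discard pending lo) lo out

-- ===== PRECONDITION & SPEC =====
-- Pre_ excludes exactly the inputs on which A raises TypeError (and B raises it too): those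
-- mixing a missing 'start'/'end' key (None) with a present one (an int), which Python can
-- neither sort (A) nor take min over (B).
def Pre_determine_time_windows (functions : List (List (String × Int))) : Prop :=
  ¬ ((functions.any fun f => ((PySem.Dict.mk f).get? "start").isNone || ((PySem.Dict.mk f).get? "end").isNone) = true
     ∧ (functions.any fun f => ((PySem.Dict.mk f).get? "start").isSome || ((PySem.Dict.mk f).get? "end").isSome) = true)
instance (functions : List (List (String × Int))) : Decidable (Pre_determine_time_windows functions) := by
  unfold Pre_determine_time_windows; infer_instance

def pvWitness_determine_time_windows : (List (List (String × Int))) :=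
  [[("start", 0), ("end", 2)], [("start", 2), ("end", 5)]]

def Spec_determine_time_windows (functions : List (List (String × Int))) (out : List (List Int)) : Prop := out = determine_time_windows_alt functions
instance (functions : List (List (String × Int))) (out : List (List Int)) : Decidable (Spec_determine_time_windows functions out) := by unfold Spec_determine_time_windows; infer_instance

-- ===== CLAIM (what is proved, stated in full; the proofs are below) =====
def Claim_equal_determine_time_windows : Prop := ∀ (functions : List (List (String × Int))), Dom_determine_time_windows functions → Pre_determine_time_windows functions → Spec_determine_time_windows functions (determine_time_windows functions)

-- ===== LEMMAS AND PROOFS =====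

-- the flattened stream of .get values, in traversal order
def osOf (fs : List (List (String × Int))) : List (Option Int) :=
  fs.flatMap (fun f => [(PySem.Dict.mk f).get? "start", (PySem.Dict.mk f).get? "end"])

-- Python's 'if x not in windows: windows.add(x)' is exactly Set.add
theorem add_if {w : PySem.Set (Option Int)} {x : Option Int} :
    (if !(PySem.Set.contains w x) then PySem.Set.add w x else w) = PySem.Set.add w x := by
  unfold PySem.Set.add
  by_cases h : PySem.Set.contains w x <;> simp

-- the plain add-add loop (B's set build) is set(osOf fs)
theorem setFold_eq (fs : List (List (String × Int))) :
    fs.foldl (fun pending function =>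
      PySem.Set.add (PySem.Set.add pending ((PySem.Dict.mk function).get? "start"))
        ((PySem.Dict.mk function).get? "end")) PySem.Set.empty = PySem.Set.ofList (osOf fs) := by
  rw [PySem.Set.ofList_eq_foldl]
  suffices h : ∀ (fs : List (List (String × Int))) (s : PySem.Set (Option Int)),
      fs.foldl (fun pending function =>
        PySem.Set.add (PySem.Set.add pending ((PySem.Dict.mk function).get? "start"))
          ((PySem.Dict.mk function).get? "end")) s = (osOf fs).foldl PySem.Set.add s from h fs _
  intro fs
  induction fs with
  | nil => intro s; rfl
  | cons f fs ih =>
      intro s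
      simp only [osOf, List.flatMap_cons, List.foldl_append, List.foldl_cons] at *
      exact ih _

-- A's membership-guarded set-building loop builds the same set(osOf fs)
theorem setA_eq (fs : List (List (String × Int))) :
    fs.foldl (fun windows function =>
      let windows :=
        if !(PySem.Set.contains windows ((PySem.Dict.mk function).get? "start")) then
          PySem.Set.add windows ((PySem.Dict.mk function).get? "start")
        else windows
      if !(PySem.Set.contains windows ((PySem.Dict.mk function).get? "end")) then
        PySem.Set.add windows ((PySem.Dict.mk function).get? "end")
      else windows) PySem.Set.empty = PySem.Set.ofList (osOf fs) := by
  rw [← setFold_eq]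
  simp only [add_if]

-- two present values with equal int payloads are equal
theorem some_ext {x y : Option Int} (hx : x.isSome = true) (hy : y.isSome = true)
    (h : x.getD 0 = y.getD 0) : x = y := by
  cases x <;> cases y <;> simp_all

-- every value in the flattened stream is present under Pre_ whenever at least one is
theorem osOf_some {fs : List (List (String × Int))}
    (hpre : Pre_determine_time_windows fs) (x : Option Int) (hx : x ∈ osOf fs)
    (hxs : x.isSome = true) : ∀ y ∈ osOf fs, y.isSome = true := by
  unfold Pre_determine_time_windows at hpre
  intro y hy
  by_contra hns
  have hyn : y = none := by cases y <;> simp_all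
  subst hyn
  apply hpre
  constructor
  · rw [List.any_eq_true]
    simp only [osOf, List.mem_flatMap, List.mem_cons, List.not_mem_nil, or_false] at hy
    obtain ⟨f, hf, hy'⟩ := hy
    refine ⟨f, hf, ?_⟩
    rw [Bool.or_eq_true]
    rcases hy' with h | h
    · left; simp [← h]
    · right; simp [← h]
  · rw [List.any_eq_true]
    simp only [osOf, List.mem_flatMap, List.mem_cons, List.not_mem_nil, or_false] at hx
    obtain ⟨f, hf, hx'⟩ := hx
    refine ⟨f, hf, ?_⟩
    rw [Bool.or_eq_true]
    rcases hx' with rfl | rfl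
    · left; exact hxs
    · right; exact hxs

-- the head of the key-sorted list is the (unique) minimum that min? extracts
theorem min_head (p : List (Option Int)) (d : Option Int) (t : List (Option Int))
    (hsome : ∀ x ∈ p, x.isSome = true)
    (hts : PySem.List.sorted p (fun o => o.getD 0) false = d :: t) :
    (PySem.List.min? p (fun o => o.getD 0)).getD none = d := by
  have hdp : d ∈ p := by
    rw [← PySem.List.mem_sorted p (fun o => o.getD 0) false d, hts]; simp
  cases hm : PySem.List.min? p (fun o => o.getD 0) with
  | none =>
      have hp : p = [] := (PySem.List.min?_eq_none_iff _ _).mp hm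
      subst hp
      cases hdp
  | some m =>
      have hmp : m ∈ p := PySem.List.min?_mem hm
      have h1 : m.getD 0 ≤ d.getD 0 := PySem.List.min?_isMin hm d hdp
      have h2 : d.getD 0 ≤ m.getD 0 := PySem.List.key_head_sorted_le p _ hts m hmp
      have := some_ext (hsome m hmp) (hsome d hdp) (le_antisymm h1 h2)
      simp [this]

-- the key-sorted list of a nodup list of present values is strictly key-increasing
theorem sorted_strict (p : List (Option Int)) (hnd : p.Nodup)
    (hsome : ∀ x ∈ p, x.isSome = true) :
    (PySem.List.sorted p (fun o => o.getD 0) false).Pairwise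
      (fun a b => a.getD 0 < b.getD 0) := by
  have hle := PySem.List.sorted_pairwise p (fun o => o.getD 0)
  have hndS : (PySem.List.sorted p (fun o => o.getD 0) false).Nodup :=
    ((PySem.List.sorted_perm p (fun o => o.getD 0) false).nodup_iff).mpr hnd
  have hne : (PySem.List.sorted p (fun o => o.getD 0) false).Pairwise (fun a b => a ≠ b) := hndS
  refine ((hle.and hne).imp_of_mem ?_)
  intro a b ha hb hab
  rcases lt_or_eq_of_le hab.1 with h | h
  · exact h
  · have hsa : a.isSome = true := hsome a ((PySem.List.mem_sorted _ _ _ _).mp ha)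
    have hsb : b.isSome = true := hsome b ((PySem.List.mem_sorted _ _ _ _).mp hb)
    exact absurd (some_ext hsa hsb h) hab.2

-- discarding the head of the sorted list sorts to its tail
theorem discard_sorted (p : List (Option Int)) (d : Option Int) (t : List (Option Int))
    (hnd : p.Nodup) (hsome : ∀ x ∈ p, x.isSome = true)
    (hts : PySem.List.sorted p (fun o => o.getD 0) false = d :: t) :
    PySem.List.sorted (PySem.Set.discard p d) (fun o => o.getD 0) false = t := by
  have hlt : (d :: t).Pairwise (fun a b => a.getD 0 < b.getD 0) := hts ▸ sorted_strict p hnd hsome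
  have hndS : (d :: t).Nodup := hts ▸ ((PySem.List.sorted_perm p _ false).nodup_iff).mpr hnd
  have hperm : t.Perm (PySem.Set.discard p d) := by
    rw [List.perm_ext_iff_of_nodup hndS.of_cons (PySem.Set.nodup_discard _ _ hnd)]
    intro x
    rw [PySem.Set.mem_discard]
    constructor
    · intro hx
      refine ⟨(PySem.List.mem_sorted p _ false x).mp (hts ▸ List.mem_cons_of_mem d hx), ?_⟩
      intro h; subst h
      exact absurd hx (List.nodup_cons.mp hndS).1
    · rintro ⟨hx, hxd⟩
      have := (PySem.List.mem_sorted p (fun o => o.getD 0) false x).mpr hx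
      rw [hts, List.mem_cons] at this
      rcases this with rfl | h
      · exact absurd rfl hxd
      · exact h
  exact PySem.List.sorted_eq_of_perm_of_pairwise_lt _ _ _ hperm (List.Pairwise.of_cons hlt)

-- B's selection loop, started after extracting the minimum, emits the adjacent
-- pairs of the sorted remaining values
theorem bLoop_eq : ∀ (n : Nat) (p : List (Option Int)), p.length ≤ n → p.Nodup →
    (∀ x ∈ p, x.isSome = true) → ∀ (lo : Option Int) (out : List (List Int)),
    bLoop n p lo out
      = out ++ ((lo :: PySem.List.sorted p (fun o => o.getD 0) false).zip
                  (PySem.List.sorted p (fun o => o.getD 0) false)).map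
                (fun q => [q.1.getD 0, q.2.getD 0]) := by
  intro n
  induction n with
  | zero =>
      intro p hlen _ _ lo out
      have hp : p = [] := List.eq_nil_of_length_eq_zero (Nat.le_zero.mp hlen)
      subst hp
      simp [bLoop, PySem.List.sorted]
  | succ n ih =>
      intro p hlen hnd hsome lo out
      cases hp : p with
      | nil =>
          subst hp
          simp [bLoop, PySem.List.sorted]
      | cons v vrest =>
          subst hp
          rw [show bLoop (n + 1) (v :: vrest) lo out
              = (if (v :: vrest).isEmpty then out
                 else
                   let nxt := (PySem.List.min? (v :: vrest) (fun o => o.getD 0)).getD none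
                   bLoop n (PySem.Set.discard (v :: vrest) nxt) nxt
                     (out ++ [[lo.getD 0, nxt.getD 0]])) from rfl]
          rw [show (v :: vrest).isEmpty = false from rfl]
          simp only [Bool.false_eq_true, if_false]
          cases hts : PySem.List.sorted (v :: vrest) (fun o => o.getD 0) false with
          | nil => exact absurd ((PySem.List.sorted_eq_nil_iff _ _ _).mp hts) (by simp)
          | cons d t =>
              have hmin := min_head (v :: vrest) d t hsome hts
              rw [hmin]
              have hdisc := discard_sorted (v :: vrest) d t hnd hsome hts
              have hlen' : (PySem.Set.discard (v :: vrest) d).length ≤ n := by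
                have h1 : (PySem.Set.discard (v :: vrest) d).length
                    = (PySem.List.sorted (PySem.Set.discard (v :: vrest) d)
                        (fun o => o.getD 0) false).length :=
                  (PySem.List.length_sorted _ _ _).symm
                have h2 : (PySem.List.sorted (v :: vrest) (fun o => o.getD 0) false).length
                    = (v :: vrest).length := PySem.List.length_sorted _ _ _
                rw [hts] at h2
                rw [h1, hdisc]
                simp at h2 hlen
                omega
              have hnd' : (PySem.Set.discard (v :: vrest) d).Nodup :=
                PySem.Set.nodup_discard _ _ hnd
              have hsome' : ∀ x ∈ PySem.Set.discard (v :: vrest) d, x.isSome = true :=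
                fun x hx => hsome x ((PySem.Set.mem_discard _ _ _).mp hx).1
              rw [ih (PySem.Set.discard (v :: vrest) d) hlen' hnd' hsome' d
                    (out ++ [[lo.getD 0, d.getD 0]])]
              rw [hdisc]
              simp

-- A's index loop 'for x in range(len(ws)-1): out.append([ws[x], ws[x+1]])', fold form → map form
theorem foldl_append_map {α β : Type} (l : List α) (f : α → List β) (acc : List (List β)) :
    l.foldl (fun out x => out ++ [f x]) acc = acc ++ l.map f := by
  induction l generalizing acc with
  | nil => simp
  | cons x l ih => simp [ih]

-- indexed adjacent pairs over d :: t are the zip of the list with its tail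
theorem range_pairs_aux : ∀ (t : List (Option Int)) (d : Option Int),
    (List.range t.length).map
      (fun (k : Nat) => [(PySem.List.pyGetD (d :: t) ((k : Int)) none).getD 0,
                 (PySem.List.pyGetD (d :: t) ((k : Int) + 1) none).getD 0])
    = ((d :: t).zip t).map (fun p => [p.1.getD 0, p.2.getD 0]) := by
  intro t
  induction t with
  | nil => intro d; simp
  | cons e t ih =>
      intro d
      rw [List.length_cons, List.range_succ_eq_map, List.map_cons, List.map_map]
      have hhead : [(PySem.List.pyGetD (d :: e :: t) ((0 : Nat) : Int) none).getD 0,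
          (PySem.List.pyGetD (d :: e :: t) (((0 : Nat) : Int) + 1) none).getD 0]
          = [d.getD 0, e.getD 0] := by
        have h1 : (((0 : Nat) : Int) + 1) = ((1 : Nat) : Int) := by omega
        rw [h1, PySem.List.pyGetD_natCast, PySem.List.pyGetD_natCast]
        simp
      rw [hhead, List.zip_cons_cons, List.map_cons, ← ih e]
      congr 1
      apply List.map_congr_left
      intro k _
      have h1 : ((k.succ : Nat) : Int) = ((k + 1 : Nat) : Int) := by norm_num
      have h2 : (((k + 1 : Nat) : Int) + 1) = ((k + 2 : Nat) : Int) := by omega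
      have h3 : ((k : Int) + 1) = ((k + 1 : Nat) : Int) := by omega
      simp only [Function.comp_apply, h1, h2, h3, PySem.List.pyGetD_natCast]
      simp

theorem range_pairs (d : Option Int) (t : List (Option Int)) :
    (PySem.List.pyRange 0 (((d :: t).length : Int) - 1) 1).map
      (fun x => [(PySem.List.pyGetD (d :: t) x none).getD 0,
                 (PySem.List.pyGetD (d :: t) (x + 1) none).getD 0])
    = ((d :: t).zip t).map (fun p => [p.1.getD 0, p.2.getD 0]) := by
  rw [PySem.List.pyRange_one]
  have hb : (((d :: t).length : Int) - 1 - 0).toNat = t.length := by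
    simp
  rw [hb, List.map_map]
  have h : ∀ k, ((fun x => [(PySem.List.pyGetD (d :: t) x none).getD 0,
                 (PySem.List.pyGetD (d :: t) (x + 1) none).getD 0]) ∘ fun k : Nat => (0 : Int) + ↑k) k
      = (fun (k : Nat) => [(PySem.List.pyGetD (d :: t) ((k : Int)) none).getD 0,
                 (PySem.List.pyGetD (d :: t) ((k : Int) + 1) none).getD 0]) k := by
    intro k; simp
  rw [List.map_congr_left (fun k _ => h k)]
  exact range_pairs_aux t d

-- ===== VERDICT (by name: the statement is the Claim_ definition above) =====
theorem determine_time_windows_spec : Claim_equal_determine_time_windows := by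
  intro fs _ hpre
  unfold Spec_determine_time_windows determine_time_windows determine_time_windows_alt
  simp only [setA_eq, setFold_eq]
  cases hvs : osOf fs with
  | nil => rfl
  | cons v vrest =>
      have hemp : (PySem.Set.ofList (v :: vrest)).isEmpty = false := by
        rw [PySem.Set.ofList_cons]; rfl
      rw [hemp]
      simp only [Bool.false_eq_true, if_false]
      have hnd := PySem.Set.nodup_ofList (v :: vrest)
      cases hts : PySem.List.sorted (PySem.Set.ofList (v :: vrest)) (fun o => o.getD 0) false with
      | nil =>
          have := (PySem.List.sorted_eq_nil_iff _ _ _).mp hts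
          rw [PySem.Set.ofList_cons] at this
          exact absurd this (by simp)
      | cons d t =>
          by_cases hall : ∀ x ∈ PySem.Set.ofList (v :: vrest), x.isSome = true
          · -- every value present: the sorted/min reasoning is exact
            have hmin := min_head _ d t hall hts
            rw [hmin]
            have hdisc := discard_sorted _ d t hnd hall hts
            have hlen : (PySem.Set.discard (PySem.Set.ofList (v :: vrest)) d).length
                ≤ (PySem.Set.ofList (v :: vrest)).length := by
              have h1 := (PySem.List.length_sorted (PySem.Set.discard (PySem.Set.ofList (v :: vrest)) d) (fun o => o.getD 0) false).symm
              have h2 := PySem.List.length_sorted (PySem.Set.ofList (v :: vrest)) (fun o => o.getD 0) false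
              rw [hts] at h2
              rw [h1, hdisc]
              simp at h2
              omega
            rw [bLoop_eq _ _ hlen (PySem.Set.nodup_discard _ _ hnd)
                  (fun x hx => hall x ((PySem.Set.mem_discard _ _ _).mp hx).1) d []]
            rw [hdisc, foldl_append_map, range_pairs]
          · -- some value is None: under Pre_ then ALL are None, the set is the singleton
            -- {none}, and both sides return []
            have hnone : ∀ y ∈ osOf fs, y = none := by
              push Not at hall
              obtain ⟨x, hx, hxs⟩ := hall
              have hxn : x = none := by cases x <;> simp_all
              subst hxn
              intro y hy
              by_contra hyn
              have hys : y.isSome = true := by cases y <;> simp_all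
              have := osOf_some hpre y hy hys none (by
                rw [hvs]; exact (PySem.Set.mem_ofList _ _).mp hx) 
              simp at this
            have hset : PySem.Set.ofList (v :: vrest) = [none] := by
              have hv : v = none := hnone v (by rw [hvs]; simp)
              have hr : ∀ y ∈ vrest, y = none := fun y hy => hnone y (by rw [hvs]; simp [hy])
              subst hv
              rw [PySem.Set.ofList_cons]
              congr 1
              have : ∀ y ∈ PySem.Set.ofList vrest, y = none := fun y hy =>
                hr y ((PySem.Set.mem_ofList _ _).mp hy)
              cases hc : PySem.Set.discard (PySem.Set.ofList vrest) none with
              | nil => rfl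
              | cons a b =>
                  have ha : a ∈ PySem.Set.discard (PySem.Set.ofList vrest) none := by
                    rw [hc]; simp
                  obtain ⟨ham, hane⟩ := (PySem.Set.mem_discard _ _ _).mp ha
                  exact absurd (this a ham) hane
            rw [hset] at hts ⊢
            -- sorted [none] = [none], so d = none and t = []
            have hsingle : PySem.List.sorted ([none] : List (Option Int)) (fun o => o.getD 0) false = [none] := rfl
            rw [hsingle] at hts
            injection hts with h1 h2
            subst h1; subst h2
            rw [show (PySem.List.min? ([none] : List (Option Int)) (fun o => o.getD 0)).getD none = none from rfl]
            rw [show PySem.Set.discard ([none] : List (Option Int)) none = [] from rfl]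
            rw [show bLoop ([none] : List (Option Int)).length [] none [] = [] from rfl]
            simp [PySem.List.pyRange]
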